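-- pv_equiv track=rewrite | github.com/merkutteam0/Turkce_dogal_dil_isleme-_icin_kutuphane_olusturulmasi | trnlp/trnlp.py | btnsilnktlm
-- ===== SOURCE A (Python) =====
-- import string
--
-- def btnsilnktlm(liste):
--     noktalama = list(string.punctuation)
--     filtrelinktlm=[]
--     for da in liste:
--         sbt=0
--         for nkt in noktalama:
--             if nkt in da:
--                 sbt+=1
--         if sbt==0:filtrelinktlm.append(da)
--     return filtrelinktlm
-- ===== SOURCE B (Python) =====
-- import string
--
-- def btnsilnktlm(liste):
--     punct = set(string.punctuation)
--     return [da for da in liste if not any(c in punct for c in da)]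
-- ===== Notes on version B (the rewrite author's own statement) =====
-- stated objective: idiomatic
-- what changed: Instead of looping over all 32 punctuation marks and counting substring hits per element, B builds a punctuation set once and keeps an element via a short-circuiting per-character set-membership scan in a list comprehension; measured faster because each element is scanned once instead of 32 substring searches.
import Mathlib
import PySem

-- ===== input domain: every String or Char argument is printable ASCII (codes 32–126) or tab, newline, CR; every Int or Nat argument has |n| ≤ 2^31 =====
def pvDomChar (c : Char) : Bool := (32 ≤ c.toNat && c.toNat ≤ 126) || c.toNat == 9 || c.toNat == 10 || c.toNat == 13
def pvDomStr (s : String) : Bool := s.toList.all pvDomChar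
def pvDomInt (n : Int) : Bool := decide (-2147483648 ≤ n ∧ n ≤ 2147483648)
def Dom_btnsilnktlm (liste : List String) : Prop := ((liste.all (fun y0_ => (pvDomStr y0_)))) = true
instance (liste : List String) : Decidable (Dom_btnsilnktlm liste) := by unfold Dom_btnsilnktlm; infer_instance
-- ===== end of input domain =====

-- B replaces A's count-over-32-punctuation-substrings loop by a single short-circuiting
-- per-character set-membership scan (idiomatic list comprehension); same results, same order.


-- ===== PORT A =====
-- noktalama = list(string.punctuation): the punctuation string split into one-char strings
def pvNoktalama : List String :=
  ("!\"#$%&'()*+,-./:;<=>?@[\\]^_`{|}~" : String).toList.map (fun c => String.ofList [c])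

def btnsilnktlm (liste : List String) : List String :=
  liste.foldl (fun filtrelinktlm da =>
    let sbt : Nat :=
      pvNoktalama.foldl (fun sbt nkt => if PySem.Str.isIn nkt da then sbt + 1 else sbt) 0
    if sbt == 0 then filtrelinktlm ++ [da] else filtrelinktlm) []

-- ===== PORT B =====
-- punct = set(string.punctuation)
def pvPunctSet : PySem.Set Char :=
  PySem.Set.ofList ("!\"#$%&'()*+,-./:;<=>?@[\\]^_`{|}~" : String).toList

def btnsilnktlm_alt (liste : List String) : List String :=
  liste.filter (fun da => ! da.toList.any (fun c => pvPunctSet.contains c))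

-- ===== PRECONDITION & SPEC =====
def Spec_btnsilnktlm (liste : List String) (out : List String) : Prop := out = btnsilnktlm_alt liste
instance (liste : List String) (out : List String) : Decidable (Spec_btnsilnktlm liste out) := by unfold Spec_btnsilnktlm; infer_instance

-- ===== CLAIM (what is proved, stated in full; the proofs are below) =====
def Claim_equal_btnsilnktlm : Prop := ∀ (liste : List String), Dom_btnsilnktlm liste → Spec_btnsilnktlm liste (btnsilnktlm liste)

-- ===== LEMMAS AND PROOFS =====

-- a single-character substring occurs in a string iff that character is a member
theorem singleton_infix_iff_mem {c : Char} {l : List Char} : [c] <:+: l ↔ c ∈ l := by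
  constructor
  · intro h
    exact (List.singleton_sublist).mp h.sublist
  · intro h
    obtain ⟨s, t, rfl⟩ := List.append_of_mem h
    exact ⟨s, t, by simp⟩

-- A's inner counting loop: final count as countP
theorem count_loop_eq (da : String) (l : List String) (n : Nat) :
    l.foldl (fun sbt nkt => if PySem.Str.isIn nkt da then sbt + 1 else sbt) n
      = n + l.countP (fun nkt => PySem.Str.isIn nkt da) := by
  induction l generalizing n with
  | nil => simp
  | cons x xs ih =>
    simp only [List.foldl_cons, List.countP_cons, ih]
    split_ifs <;> simp <;> omega

-- A keeps da iff B keeps da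
theorem keep_eq (da : String) :
    ((pvNoktalama.foldl (fun sbt nkt => if PySem.Str.isIn nkt da then sbt + 1 else sbt) 0) == 0)
      = (! da.toList.any (fun c => pvPunctSet.contains c)) := by
  rw [count_loop_eq]
  rw [Bool.eq_iff_iff]
  simp only [Nat.zero_add, beq_iff_eq, List.countP_eq_zero, Bool.not_eq_true',
    List.any_eq_false]
  constructor
  · intro h c hcd hps
    have hc : c ∈ ("!\"#$%&'()*+,-./:;<=>?@[\\]^_`{|}~" : String).toList := by
      simpa [pvPunctSet, PySem.Set.contains_iff, PySem.Set.mem_ofList] using hps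
    have hmem : String.ofList [c] ∈ pvNoktalama := by
      simp only [pvNoktalama, List.mem_map]
      exact ⟨c, hc, rfl⟩
    apply h _ hmem
    rw [PySem.Str.isIn_eq, String.toList_ofList]
    rw [PySem.Chars.isIn_iff_infix]
    exact singleton_infix_iff_mem.mpr hcd
  · intro h nkt hnkt
    simp only [pvNoktalama, List.mem_map] at hnkt
    obtain ⟨c, hc, rfl⟩ := hnkt
    intro hIn
    rw [PySem.Str.isIn_eq, String.toList_ofList, PySem.Chars.isIn_iff_infix] at hIn
    have hcd : c ∈ da.toList := singleton_infix_iff_mem.mp hIn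
    apply h c hcd
    simp only [pvPunctSet, PySem.Set.contains_iff, PySem.Set.mem_ofList]
    exact hc

-- A's outer append-loop is a filter
theorem outer_loop_eq (liste acc : List String) :
    liste.foldl (fun filtrelinktlm da =>
      let sbt : Nat :=
        pvNoktalama.foldl (fun sbt nkt => if PySem.Str.isIn nkt da then sbt + 1 else sbt) 0
      if sbt == 0 then filtrelinktlm ++ [da] else filtrelinktlm) acc
      = acc ++ liste.filter (fun da => ! da.toList.any (fun c => pvPunctSet.contains c)) := by
  induction liste generalizing acc with
  | nil => simp
  | cons x xs ih =>
    simp only [List.foldl_cons, List.filter_cons]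
    rw [ih, ← keep_eq x]
    split_ifs <;> simp

-- ===== VERDICT (by name: the statement is the Claim_ definition above) =====
theorem btnsilnktlm_spec : Claim_equal_btnsilnktlm := by
  intro liste _
  unfold Spec_btnsilnktlm btnsilnktlm btnsilnktlm_alt
  simpa using outer_loop_eq liste []
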